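-- pv_equiv track=rewrite | github.com/DymashevskijSP/Python_Hw | HW_2/EasyTask.py | printline
-- ===== SOURCE A (Python) =====
-- def printline(line, index, left):
--     if index < len(line):
--         if left == 1:
--             return line[index] + "\\\\ \n"
--         return line[index]+"&" + printline(line, index + 1, left - 1)
--     if left == 1:
--         return "\\\\ \n"
--     return "&" + printline(line, index + 1, left - 1)
-- ===== SOURCE B (Python) =====
-- def printline(line, index, left):
--     n = len(line)
--     pieces = [(line[i] if i < n else "") for i in range(index, index + left)]
--     return "&".join(pieces) + "\\\\ \n"
-- ===== Notes on version B (the rewrite author's own statement) =====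
-- stated objective: simpler
-- what changed: A's per-column recursion (emitting one cell and '&' per call, with a left==1 base case) is replaced by a single comprehension building the list of cell pieces over range(index, index+left) joined with '&' plus the row terminator.
import Mathlib
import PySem

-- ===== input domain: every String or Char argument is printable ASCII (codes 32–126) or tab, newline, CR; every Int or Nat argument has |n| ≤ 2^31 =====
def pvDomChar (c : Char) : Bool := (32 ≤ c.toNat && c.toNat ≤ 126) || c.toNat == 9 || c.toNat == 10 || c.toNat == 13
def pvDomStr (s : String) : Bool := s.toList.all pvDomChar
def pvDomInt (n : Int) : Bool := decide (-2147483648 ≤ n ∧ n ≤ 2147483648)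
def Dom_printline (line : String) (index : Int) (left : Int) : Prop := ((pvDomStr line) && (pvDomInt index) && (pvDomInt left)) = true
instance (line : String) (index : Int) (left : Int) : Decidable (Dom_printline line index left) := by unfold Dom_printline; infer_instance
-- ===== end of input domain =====

-- B replaces A's per-column recursion by one comprehension of the column pieces joined with "&" (simpler decomposition; no speed claim).

-- ===== PORT A =====
-- A's recursion, step for step, on the code-point list; the Nat fuel only totalises
-- the port (Python recurses unboundedly for left ≤ 0; excluded by Pre_) — with
-- left ≥ 1 the fuel left.toNat is never exhausted.
def printlineGo (cs : List Char) (index : Int) (left : Int) : Nat → List Char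
  | 0 => []
  | fuel + 1 =>
    if index < (cs.length : Int) then
      if left == 1 then (PySem.List.pyGetD cs index ' ') :: "\\\\ \n".toList
      else (PySem.List.pyGetD cs index ' ') :: '&' :: printlineGo cs (index + 1) (left - 1) fuel
    else if left == 1 then "\\\\ \n".toList
    else '&' :: printlineGo cs (index + 1) (left - 1) fuel

def printline (line : String) (index : Int) (left : Int) : String :=
  String.ofList (printlineGo line.toList index left left.toNat)

-- ===== PORT B =====
def printline_alt (line : String) (index : Int) (left : Int) : String :=
  String.ofList
    (List.intercalate ['&']
      ((PySem.List.pyRange index (index + left) 1).map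
        (fun i => if i < (line.toList.length : Int) then [PySem.List.pyGetD line.toList i ' '] else ([] : List Char)))
      ++ "\\\\ \n".toList)

-- ===== PRECONDITION & SPEC =====
-- Pre_ excludes exactly where Python A raises: left ≤ 0 (unbounded recursion → RecursionError)
-- and index < -len(line) (IndexError on line[index]).
def Pre_printline (line : String) (index : Int) (left : Int) : Prop :=
  1 ≤ left ∧ -(line.toList.length : Int) ≤ index
instance (line : String) (index : Int) (left : Int) : Decidable (Pre_printline line index left) := by unfold Pre_printline; infer_instance

def pvWitness_printline : String × Int × Int := ("abc", 0, 5)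

def Spec_printline (line : String) (index : Int) (left : Int) (out : String) : Prop := out = printline_alt line index left
instance (line : String) (index : Int) (left : Int) (out : String) : Decidable (Spec_printline line index left out) := by unfold Spec_printline; infer_instance

-- ===== CLAIM (what is proved, stated in full; the proofs are below) =====
def Claim_equal_printline : Prop := ∀ (line : String) (index : Int) (left : Int), Dom_printline line index left → Pre_printline line index left → Spec_printline line index left (printline line index left)

-- ===== LEMMAS AND PROOFS =====

lemma intercalate_cons_of_ne_nil {α : Type} (sep x : List α) (xs : List (List α)) (h : xs ≠ []) :
    List.intercalate sep (x :: xs) = x ++ sep ++ List.intercalate sep xs := by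
  cases xs with
  | nil => exact absurd rfl h
  | cons y ys => simp [List.intercalate]

lemma printlineGo_eq (cs : List Char) :
    ∀ (n : Nat) (index : Int),
      printlineGo cs index ((n : Int) + 1) (n + 1) =
        List.intercalate ['&'] ((PySem.List.pyRange index (index + ((n : Int) + 1)) 1).map
          (fun i => if i < (cs.length : Int) then [PySem.List.pyGetD cs i ' '] else ([] : List Char)))
        ++ "\\\\ \n".toList := by
  intro n
  induction n with
  | zero =>
    intro index
    rw [printlineGo]
    simp only [Int.natCast_zero, zero_add]
    rw [PySem.List.pyRange_one_singleton]
    simp only [show (((1:Int)) == (1:Int)) = true from rfl, if_true]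
    split_ifs with h1 <;> simp [List.intercalate, h1]
  | succ m ih =>
    intro index
    rw [printlineGo]
    rw [show index + (((m + 1 : Nat) : Int) + 1) = index + ((m : Int) + 1) + 1 by push_cast; ring]
    rw [PySem.List.pyRange_one_cons (by omega : index < index + ((m : Int) + 1) + 1)]
    rw [show index + ((m : Int) + 1) + 1 = (index + 1) + ((m : Int) + 1) by ring]
    have hne : (PySem.List.pyRange (index + 1) ((index + 1) + ((m : Int) + 1)) 1).map
        (fun i => if i < (cs.length : Int) then [PySem.List.pyGetD cs i ' '] else ([] : List Char)) ≠ [] := by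
      rw [PySem.List.pyRange_one_cons (by omega : (index + 1) < (index + 1) + ((m : Int) + 1))]
      simp
    rw [List.map_cons, intercalate_cons_of_ne_nil _ _ _ hne]
    have hrec := ih (index + 1)
    have hb : ((((m + 1 : Nat) : Int) + 1) == (1 : Int)) = false := by
      simp only [beq_eq_false_iff_ne, ne_eq]
      push_cast; omega
    have harg : (((m + 1 : Nat) : Int) + 1) - 1 = (m : Int) + 1 := by push_cast; ring
    simp only [hb, Bool.false_eq_true, if_false, harg, hrec]
    split_ifs with hx <;> simp

-- ===== VERDICT (by name: the statement is the Claim_ definition above) =====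
theorem printline_spec : Claim_equal_printline := by
  intro line index left _ hpre
  unfold Spec_printline printline printline_alt
  obtain ⟨h1, -⟩ := hpre
  obtain ⟨n, hn⟩ : ∃ n : Nat, left = (n : Int) + 1 := ⟨(left - 1).toNat, by omega⟩
  subst hn
  rw [show (((n : Int) + 1)).toNat = n + 1 by omega, printlineGo_eq]
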